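-- pv_equiv track=rewrite | github.com/Esensia/practice | programmers/체육복.py | solution
-- ===== SOURCE A (Python) =====
-- def solution(n, lost, reserve):
--     answer = n
--
--     lost.sort()
--     new_list = list(lost)
--     reserve.sort()
--     for l in lost :
--         if l in reserve :
--             reserve.remove(l)
--             new_list.remove(l)
--
--     for l in new_list :
--         answer -=1
--         if l-1 in reserve :
--             reserve.remove(l-1)
--             answer+=1
--             continue
--         if l+1 in reserve :
--             reserve.remove(l+1)
--             answer+=1
--
--     return answer
-- ===== SOURCE B (Python) =====
-- def solution(n, lost, reserve):
--     # Two-pointer merge over the two sorted lists instead of membership scans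
--     # and in-place removes: one linear merge cancels own-reserve pairs, one
--     # linear sweep with a cursor does the neighbor borrowing.
--     # Note: A sorts/mutates its lost and reserve arguments in place; B does not.
--     L = sorted(lost)
--     R = sorted(reserve)
--     # phase 1: cancel exact pairs by merging the two sorted lists
--     L2, R2 = [], []
--     i = j = 0
--     while i < len(L) and j < len(R):
--         if L[i] == R[j]:
--             i += 1
--             j += 1
--         elif L[i] < R[j]:
--             L2.append(L[i])
--             i += 1
--         else:
--             R2.append(R[j])
--             j += 1
--     L2.extend(L[i:])
--     R2.extend(R[j:])
--     # phase 2: borrow from neighbors with a single forward cursor over R2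
--     matched = 0
--     j = 0
--     for l in L2:
--         while j < len(R2) and R2[j] < l - 1:
--             j += 1
--         if j < len(R2) and (R2[j] == l - 1 or R2[j] == l + 1):
--             matched += 1
--             j += 1
--     return n - len(L2) + matched
-- ===== Notes on version B (the rewrite author's own statement) =====
-- stated objective: faster
-- what changed: Replaces A's membership scans and list.remove calls with two linear two-pointer passes over the sorted lists: a merge that cancels exact lost/reserve pairs, then a single forward-cursor sweep that borrows from l-1 or l+1 without ever rescanning the reserve list.
import Mathlib
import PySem

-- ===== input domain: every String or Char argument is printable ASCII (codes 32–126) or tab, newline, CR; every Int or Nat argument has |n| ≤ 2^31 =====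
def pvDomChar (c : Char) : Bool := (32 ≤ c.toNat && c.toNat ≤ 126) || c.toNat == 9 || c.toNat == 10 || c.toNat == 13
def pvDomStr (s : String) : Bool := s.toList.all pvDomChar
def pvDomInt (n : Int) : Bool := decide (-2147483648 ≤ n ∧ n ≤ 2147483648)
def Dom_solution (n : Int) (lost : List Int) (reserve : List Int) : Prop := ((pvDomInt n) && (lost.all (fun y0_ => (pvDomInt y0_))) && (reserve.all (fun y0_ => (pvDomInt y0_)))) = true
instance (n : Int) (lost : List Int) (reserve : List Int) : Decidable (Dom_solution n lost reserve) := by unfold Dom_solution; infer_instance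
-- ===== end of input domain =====

-- B replaces A's repeated membership scans / removes by two linear two-pointer passes
-- over the sorted lists (faster); A sorts and removes from its lost/reserve arguments
-- in place, B does not mutate them: the equivalence proved is about the RETURN value only.

-- ===== PORT A =====
-- remove? is guarded by 'contains', so '.getD' never takes its default (Python's list.remove after an 'in' check).
def solution (n : Int) (lost : List Int) (reserve : List Int) : Int :=
  let lostS := PySem.List.sorted lost (fun x => x) false
  let reserveS := PySem.List.sorted reserve (fun x => x) false
  let st1 := lostS.foldl (fun (st : List Int × List Int) l =>
    if st.1.contains l then
      ((PySem.List.remove? st.1 l).getD st.1, (PySem.List.remove? st.2 l).getD st.2)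
    else st) (reserveS, lostS)
  let st2 := st1.2.foldl (fun (st : Int × List Int) l =>
    if st.2.contains (l - 1) then (st.1 - 1 + 1, (PySem.List.remove? st.2 (l - 1)).getD st.2)
    else if st.2.contains (l + 1) then (st.1 - 1 + 1, (PySem.List.remove? st.2 (l + 1)).getD st.2)
    else (st.1 - 1, st.2)) (n, st1.1)
  st2.1

-- ===== PORT B =====
-- Source B's first while loop: merge the two sorted lists, cancelling exact pairs
-- (the obvious structural recursion over the two cursors i, j).
def cancel : List Int → List Int → List Int × List Int
  | [], r => ([], r)
  | l :: L, [] => (l :: L, [])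
  | l :: L, r :: R =>
    if l = r then cancel L R
    else if l < r then
      let p := cancel L (r :: R); (l :: p.1, p.2)
    else
      let p := cancel (l :: L) R; (p.1, r :: p.2)
termination_by L R => L.length + R.length

-- Source B's second loop: forward cursor j over R (the cursor's suffix is carried;
-- the inner 'while … j += 1' is List.dropWhile).
def sweep : List Int → List Int → Int
  | [], _ => 0
  | l :: L, R =>
    match R.dropWhile (fun r => decide (r < l - 1)) with
    | [] => sweep L []
    | r :: R' => if r = l - 1 ∨ r = l + 1 then 1 + sweep L R' else sweep L (r :: R')

def solution_alt (n : Int) (lost : List Int) (reserve : List Int) : Int :=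
  let p := cancel (PySem.List.sorted lost (fun x => x) false)
                  (PySem.List.sorted reserve (fun x => x) false)
  n - (p.1.length : Int) + sweep p.1 p.2

-- ===== PRECONDITION & SPEC =====
def Spec_solution (n : Int) (lost : List Int) (reserve : List Int) (out : Int) : Prop := out = solution_alt n lost reserve
instance (n : Int) (lost : List Int) (reserve : List Int) (out : Int) : Decidable (Spec_solution n lost reserve out) := by unfold Spec_solution; infer_instance

-- ===== CLAIM =====
def Claim_equal_solution : Prop := ∀ (n : Int) (lost : List Int) (reserve : List Int), Dom_solution n lost reserve → Spec_solution n lost reserve (solution n lost reserve)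

-- ===== LEMMAS AND PROOFS =====

-- proof-side functional form of A's first loop
def phase1A : List Int → List Int → List Int × List Int
  | [], res => (res, [])
  | l :: L, res =>
    if l ∈ res then phase1A L (res.erase l)
    else
      let p := phase1A L res; (p.1, l :: p.2)

-- proof-side matched count of A's second loop
def m2 : List Int → List Int → Int
  | [], _ => 0
  | l :: L, res =>
    if (l - 1) ∈ res then 1 + m2 L (res.erase (l - 1))
    else if (l + 1) ∈ res then 1 + m2 L (res.erase (l + 1))
    else m2 L res

theorem remove?_append_not_mem (nd : List Int) (l : Int) (t : List Int) (h : l ∉ nd) :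
    PySem.List.remove? (nd ++ l :: t) l = some (nd ++ t) := by
  induction nd with
  | nil => simp [PySem.List.remove?_cons_self]
  | cons x xs ih =>
    simp only [List.mem_cons, not_or] at h
    rw [List.cons_append, PySem.List.remove?_cons_of_ne _ (Ne.symm h.1), ih h.2]
    rfl

-- A's first fold equals phase1A (processed needy accumulate in front of the cursor)
theorem loop1A (xs : List Int) (res nd : List Int) (hnd : ∀ x ∈ nd, x ∉ res) :
    (xs.foldl (fun (st : List Int × List Int) l =>
      if st.1.contains l then
        ((PySem.List.remove? st.1 l).getD st.1, (PySem.List.remove? st.2 l).getD st.2)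
      else st) (res, nd ++ xs))
    = ((phase1A xs res).1, nd ++ (phase1A xs res).2) := by
  induction xs generalizing res nd with
  | nil => simp [phase1A]
  | cons l t ih =>
    simp only [List.foldl_cons, phase1A]
    by_cases hm : l ∈ res
    · have hc : res.contains l = true := List.contains_iff_mem.mpr hm
      have hnotnd : l ∉ nd := fun h => hnd l h hm
      rw [if_pos hm, if_pos hc, PySem.List.remove?_eq_some_erase _ _ hm,
        remove?_append_not_mem nd l t hnotnd]
      simp only [Option.getD_some]
      exact ih (res.erase l) nd (fun x hx hx' => hnd x hx (List.mem_of_mem_erase hx'))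
    · have hc : ¬ res.contains l = true := fun h => hm (List.contains_iff_mem.mp h)
      rw [if_neg hm, if_neg hc]
      have harr : nd ++ l :: t = (nd ++ [l]) ++ t := by simp
      rw [harr, ih res (nd ++ [l]) (fun x hx => by
        rcases List.mem_append.mp hx with h1 | h1
        · exact hnd x h1
        · simpa using (by simpa using h1 : x = l) ▸ hm)]
      simp

-- A's second fold: answer = a - #needy + matched
theorem loop2m (xs : List Int) (a : Int) (res : List Int) :
    (xs.foldl (fun (st : Int × List Int) l =>
      if st.2.contains (l - 1) then (st.1 - 1 + 1, (PySem.List.remove? st.2 (l - 1)).getD st.2)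
      else if st.2.contains (l + 1) then (st.1 - 1 + 1, (PySem.List.remove? st.2 (l + 1)).getD st.2)
      else (st.1 - 1, st.2)) (a, res)).1
    = a - (xs.length : Int) + m2 xs res := by
  induction xs generalizing a res with
  | nil => simp [m2]
  | cons l t ih =>
    simp only [List.foldl_cons, m2, List.length_cons]
    by_cases h1 : (l - 1) ∈ res
    · have hc : res.contains (l - 1) = true := List.contains_iff_mem.mpr h1
      rw [if_pos h1, if_pos hc, PySem.List.remove?_eq_some_erase _ _ h1]
      simp only [Option.getD_some]
      rw [ih]
      push_cast; ring
    · have hc : ¬ res.contains (l - 1) = true := fun h => h1 (List.contains_iff_mem.mp h)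
      rw [if_neg h1, if_neg hc]
      by_cases h2 : (l + 1) ∈ res
      · have hc2 : res.contains (l + 1) = true := List.contains_iff_mem.mpr h2
        rw [if_pos h2, if_pos hc2, PySem.List.remove?_eq_some_erase _ _ h2]
        simp only [Option.getD_some]
        rw [ih]
        push_cast; ring
      · have hc2 : ¬ res.contains (l + 1) = true := fun h => h2 (List.contains_iff_mem.mp h)
        rw [if_neg h2, if_neg hc2, ih]
        push_cast; ring

theorem phase1A_nil_res (L : List Int) : phase1A L [] = ([], L) := by
  induction L with
  | nil => simp [phase1A]
  | cons l t ih => simp [phase1A, ih]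

-- a reserve head smaller than every lost value is never touched by phase1A
theorem phase1A_skip (LL : List Int) (r : Int) (R : List Int) (h : ∀ x ∈ LL, r < x) :
    phase1A LL (r :: R) = (r :: (phase1A LL R).1, (phase1A LL R).2) := by
  induction LL generalizing R with
  | nil => simp [phase1A]
  | cons x t ih =>
    have hxr : r < x := h x (by simp)
    have hne : x ≠ r := by omega
    have hmem : x ∈ r :: R ↔ x ∈ R := by simp [hne]
    simp only [phase1A, hmem]
    by_cases hx : x ∈ R
    · rw [if_pos hx, if_pos hx, List.erase_cons_tail (by simp; omega)]
      exact ih _ (fun y hy => h y (by simp [hy]))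
    · rw [if_neg hx, if_neg hx, ih _ (fun y hy => h y (by simp [hy]))]

theorem pairwise_head_le {l : Int} {L : List Int} (h : (l :: L).Pairwise (· ≤ ·)) :
    ∀ x ∈ l :: L, l ≤ x := by
  intro x hx
  rcases List.mem_cons.mp hx with h1 | h1
  · omega
  · exact (List.pairwise_cons.mp h).1 x h1

theorem phase1A_eq_cancel (L R : List Int) (hL : L.Pairwise (· ≤ ·)) (hR : R.Pairwise (· ≤ ·)) :
    phase1A L R = ((cancel L R).2, (cancel L R).1) := by
  induction L, R using cancel.induct with
  | case1 R => simp [phase1A, cancel]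
  | case2 l L => simp [cancel, phase1A_nil_res]
  | case3 L r R ih =>
    have hmem : r ∈ r :: R := by simp
    simp only [phase1A, if_pos hmem, List.erase_cons_head, cancel]
    exact ih hL.tail hR.tail
  | case4 l L r R hne hlt ih =>
    have hnm : l ∉ r :: R := fun hm => by
      have := pairwise_head_le hR l hm; omega
    simp only [phase1A, if_neg hnm, cancel, if_neg hne, if_pos hlt]
    rw [ih hL.tail hR]
  | case5 l L r R hne hge ih =>
    have hrl : ∀ x ∈ l :: L, r < x := fun x hx => by
      have := pairwise_head_le hL x hx; omega
    rw [phase1A_skip _ _ _ hrl, ih hL hR.tail]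
    simp only [cancel, if_neg hne, if_neg hge]

theorem cancel_sublist (L R : List Int) :
    List.Sublist (cancel L R).1 L ∧ List.Sublist (cancel L R).2 R := by
  induction L, R using cancel.induct with
  | case1 R => simp [cancel]
  | case2 l L => simp [cancel]
  | case3 L r R ih =>
    simp only [cancel]
    exact ⟨ih.1.trans (List.sublist_cons_self _ _), ih.2.trans (List.sublist_cons_self _ _)⟩
  | case4 l L r R hne hlt ih =>
    simp only [cancel, if_neg hne, if_pos hlt]
    exact ⟨ih.1.cons₂ _, ih.2⟩
  | case5 l L r R hne hge ih =>
    simp only [cancel, if_neg hne, if_neg hge]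
    exact ⟨ih.1, ih.2.cons₂ _⟩

theorem cancel_disjoint (L R : List Int) (hL : L.Pairwise (· ≤ ·)) (hR : R.Pairwise (· ≤ ·)) :
    ∀ x ∈ (cancel L R).1, x ∉ (cancel L R).2 := by
  induction L, R using cancel.induct with
  | case1 R => simp [cancel]
  | case2 l L => simp [cancel]
  | case3 L r R ih =>
    simp only [cancel]
    exact ih hL.tail hR.tail
  | case4 l L r R hne hlt ih =>
    simp only [cancel, if_neg hne, if_pos hlt]
    intro x hx hx2
    have hsub := (cancel_sublist L (r :: R)).2
    have hx2' : x ∈ r :: R := hsub.mem hx2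
    have hxr : r ≤ x := pairwise_head_le hR x hx2'
    rcases List.mem_cons.mp hx with h1 | h1
    · omega
    · exact ih hL.tail hR x h1 hx2
  | case5 l L r R hne hge ih =>
    simp only [cancel, if_neg hne, if_neg hge]
    intro x hx hx2
    have hsub := (cancel_sublist (l :: L) R).1
    have hx1' : x ∈ l :: L := hsub.mem hx
    have hlx : l ≤ x := pairwise_head_le hL x hx1'
    rcases List.mem_cons.mp hx2 with h1 | h1
    · omega
    · exact ih hL hR.tail x hx h1

-- a reserve value below every needy-1 is never borrowed
theorem m2_drop_small (LL : List Int) (r : Int) (res : List Int)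
    (h : ∀ x ∈ LL, r < x - 1) : m2 LL (r :: res) = m2 LL res := by
  induction LL generalizing res with
  | nil => simp [m2]
  | cons l t ih =>
    have hrl : r < l - 1 := h l (by simp)
    have h1 : (l - 1) ∈ r :: res ↔ (l - 1) ∈ res := by
      simp; omega
    have h2 : (l + 1) ∈ r :: res ↔ (l + 1) ∈ res := by
      simp; omega
    have ht : ∀ x ∈ t, r < x - 1 := fun x hx => h x (by simp [hx])
    simp only [m2, h1, h2]
    by_cases c1 : (l - 1) ∈ res
    · rw [if_pos c1, if_pos c1, List.erase_cons_tail (by simp; omega)]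
      rw [ih _ ht]
    · rw [if_neg c1, if_neg c1]
      by_cases c2 : (l + 1) ∈ res
      · rw [if_pos c2, if_pos c2, List.erase_cons_tail (by simp; omega)]
        rw [ih _ ht]
      · rw [if_neg c2, if_neg c2, ih _ ht]

theorem m2_eq_sweep : ∀ (L R : List Int), L.Pairwise (· ≤ ·) → R.Pairwise (· ≤ ·) →
    (∀ x ∈ L, x ∉ R) → m2 L R = sweep L R := by
  intro L
  induction L with
  | nil => intro R _ _ _; simp [m2, sweep]
  | cons l t ihL =>
    intro R
    induction R with
    | nil =>
      intro hL _ _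
      have h1 : m2 (l :: t) [] = m2 t [] := by simp [m2]
      have h2 : sweep (l :: t) [] = sweep t [] := by simp [sweep]
      rw [h1, h2]
      exact ihL [] hL.tail (by simp) (by simp)
    | cons r R' ihR =>
      intro hL hR hd
      by_cases hsk : r < l - 1
      · have hdw : (r :: R').dropWhile (fun r => decide (r < l - 1))
            = R'.dropWhile (fun r => decide (r < l - 1)) := by
          simp [hsk]
        have hsw : sweep (l :: t) (r :: R') = sweep (l :: t) R' := by
          simp only [sweep, hdw]
        have hm : m2 (l :: t) (r :: R') = m2 (l :: t) R' := by
          apply m2_drop_small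
          intro x hx
          have := pairwise_head_le hL x hx; omega
        rw [hm, hsw]
        exact ihR hL hR.tail (fun x hx hx' => hd x hx (by simp [hx']))
      · have hdw : (r :: R').dropWhile (fun r => decide (r < l - 1)) = r :: R' := by
          simp [hsk]
        have hrR : ∀ x ∈ r :: R', r ≤ x := pairwise_head_le hR
        by_cases c1 : r = l - 1
        · have hm1 : (l - 1) ∈ r :: R' := by simp [c1]
          have hsw : sweep (l :: t) (r :: R') = 1 + sweep t R' := by
            simp only [sweep, hdw]
            rw [if_pos (Or.inl c1)]
          have herase : (r :: R').erase (l - 1) = R' := by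
            rw [← c1, List.erase_cons_head]
          simp only [m2, if_pos hm1, herase, hsw]
          congr 1
          exact ihL R' hL.tail hR.tail
            (fun x hx hx' => hd x (by simp [hx]) (by simp [hx']))
        · have hnm1 : (l - 1) ∉ r :: R' := fun hm => by
            have := hrR _ hm; omega
          have hrl : r ≠ l := fun h => hd l (by simp) (by simp [h])
          by_cases c2 : r = l + 1
          · have hm2 : (l + 1) ∈ r :: R' := by simp [c2]
            have hsw : sweep (l :: t) (r :: R') = 1 + sweep t R' := by
              simp only [sweep, hdw]
              rw [if_pos (Or.inr c2)]
            have herase : (r :: R').erase (l + 1) = R' := by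
              rw [← c2, List.erase_cons_head]
            simp only [m2, if_neg hnm1, if_pos hm2, herase, hsw]
            congr 1
            exact ihL R' hL.tail hR.tail
              (fun x hx hx' => hd x (by simp [hx]) (by simp [hx']))
          · have hnm2 : (l + 1) ∉ r :: R' := fun hm => by
              have := hrR _ hm; omega
            have hsw : sweep (l :: t) (r :: R') = sweep t (r :: R') := by
              simp only [sweep, hdw]
              rw [if_neg (by omega)]
            simp only [m2, if_neg hnm1, if_neg hnm2, hsw]
            exact ihL (r :: R') hL.tail hR (fun x hx => hd x (by simp [hx]))

-- ===== VERDICT =====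
theorem solution_spec : Claim_equal_solution := by
  intro n lost reserve _
  unfold Spec_solution
  dsimp only [solution, solution_alt]
  have hLs : (PySem.List.sorted lost (fun x => x) false).Pairwise (· ≤ ·) :=
    PySem.List.sorted_pairwise lost (fun x => x)
  have hRs : (PySem.List.sorted reserve (fun x => x) false).Pairwise (· ≤ ·) :=
    PySem.List.sorted_pairwise reserve (fun x => x)
  have h1 := loop1A (PySem.List.sorted lost (fun x => x) false)
      (PySem.List.sorted reserve (fun x => x) false) [] (by simp)
  simp only [List.nil_append] at h1
  rw [h1, loop2m, phase1A_eq_cancel _ _ hLs hRs]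
  have hsub := cancel_sublist (PySem.List.sorted lost (fun x => x) false)
      (PySem.List.sorted reserve (fun x => x) false)
  rw [m2_eq_sweep _ _ (hLs.sublist hsub.1) (hRs.sublist hsub.2)
      (cancel_disjoint _ _ hLs hRs)]
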